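-- pv_equiv track=rewrite | github.com/darrenangle/abide | src/abide/primitives/phonetics.py | _get_final_consonants
-- ===== SOURCE A (Python) =====
-- CMU_VOWELS = frozenset([
--     "AA", "AE", "AH", "AO", "AW", "AY", "EH", "ER", "EY", "IH",
--     "IY", "OW", "OY", "UH", "UW",
-- ])
--
-- def _is_vowel_phoneme(phoneme: str) -> bool:
--     """Check if a phoneme is a vowel (strip stress first)."""
--     base = "".join(c for c in phoneme if not c.isdigit())
--     return base in CMU_VOWELS
--
-- def _get_final_consonants(phonemes: tuple[str, ...]) -> tuple[str, ...]:
--     """Get consonants after the last vowel."""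
--     result = []
--     found_last_vowel = False
--     for p in reversed(phonemes):
--         if _is_vowel_phoneme(p):
--             found_last_vowel = True
--             break
--         result.insert(0, p)
--     return tuple(result) if found_last_vowel else ()
-- ===== SOURCE B (Python) =====
-- CMU_VOWELS = frozenset([
--     "AA", "AE", "AH", "AO", "AW", "AY", "EH", "ER", "EY", "IH",
--     "IY", "OW", "OY", "UH", "UW",
-- ])
--
-- def _is_vowel_phoneme(phoneme: str) -> bool:
--     base = "".join(c for c in phoneme if not c.isdigit())
--     return base in CMU_VOWELS
--
-- def _get_final_consonants(phonemes: tuple[str, ...]) -> tuple[str, ...]: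
--     """Forward scan: remember the index of the most recent vowel, then slice."""
--     last = None
--     for i, p in enumerate(phonemes):
--         if _is_vowel_phoneme(p):
--             last = i
--     return () if last is None else tuple(phonemes[last + 1:])
-- ===== Notes on version B (the rewrite author's own statement) =====
-- stated objective: faster
-- what changed: Replaces the reverse scan with break and incremental result.insert(0, p) by a forward scan that records the last vowel index and returns one slice phonemes[last+1:].
import Mathlib
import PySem

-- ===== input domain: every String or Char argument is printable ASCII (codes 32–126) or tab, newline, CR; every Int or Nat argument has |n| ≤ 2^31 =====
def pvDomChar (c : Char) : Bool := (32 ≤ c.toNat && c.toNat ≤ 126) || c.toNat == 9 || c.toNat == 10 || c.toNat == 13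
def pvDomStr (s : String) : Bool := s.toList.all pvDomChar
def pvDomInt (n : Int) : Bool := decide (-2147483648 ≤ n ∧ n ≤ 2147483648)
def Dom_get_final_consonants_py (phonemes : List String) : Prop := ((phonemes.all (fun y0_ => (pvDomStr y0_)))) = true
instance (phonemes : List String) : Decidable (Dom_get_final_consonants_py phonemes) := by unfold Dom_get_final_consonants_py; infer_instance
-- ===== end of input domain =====

-- B replaces A's reverse scan with insert(0, p) by a forward last-vowel-index scan plus one slice (simpler).

-- ===== PORT A =====
def pvCmuVowels : List String :=
  ["AA", "AE", "AH", "AO", "AW", "AY", "EH", "ER", "EY", "IH",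
   "IY", "OW", "OY", "UH", "UW"]

-- shared helper _is_vowel_phoneme (identical in Source A and Source B); c.isdigit() = Char.isDigit, exact on ASCII
def pvIsVowel (phoneme : String) : Bool :=
  pvCmuVowels.contains (String.mk (phoneme.toList.filter (fun c => !c.isDigit)))

-- A's loop over reversed(phonemes) with break; result.insert(0, p) is p :: result
def pvLoopA : List String → List String → (List String × Bool)
  | [], result => (result, false)
  | p :: rest, result =>
      if pvIsVowel p then (result, true) else pvLoopA rest (p :: result)

def get_final_consonants_py (phonemes : List String) : List String :=
  let r := pvLoopA phonemes.reverse []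
  if r.2 then r.1 else []

-- ===== PORT B =====
def get_final_consonants_py_alt (phonemes : List String) : List String :=
  let last := (PySem.List.enumerate phonemes 0).foldl
    (fun acc ip => if pvIsVowel ip.2 then some ip.1 else acc) (none : Option Int)
  match last with
  | none => []
  | some i => PySem.List.slice phonemes (some (i + 1)) none

-- ===== PRECONDITION & SPEC =====
def Spec_get_final_consonants_py (phonemes : List String) (out : List String) : Prop := out = get_final_consonants_py_alt phonemes
instance (phonemes : List String) (out : List String) : Decidable (Spec_get_final_consonants_py phonemes out) := by unfold Spec_get_final_consonants_py; infer_instance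

-- ===== CLAIM (what is proved, stated in full; the proofs are below) =====
def Claim_equal_get_final_consonants_py : Prop := ∀ (phonemes : List String), Dom_get_final_consonants_py phonemes → Spec_get_final_consonants_py phonemes (get_final_consonants_py phonemes)

-- ===== LEMMAS AND PROOFS =====

-- A's loop returns the reversed non-vowel prefix of its input and whether a vowel was found
theorem pvLoopA_char (xs acc : List String) :
    pvLoopA xs acc =
      if xs.any pvIsVowel then ((xs.takeWhile (fun p => !pvIsVowel p)).reverse ++ acc, true)
      else (xs.reverse ++ acc, false) := by
  induction xs generalizing acc with
  | nil => simp [pvLoopA]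
  | cons p rest ih =>
    by_cases hv : pvIsVowel p
    · simp [pvLoopA, hv]
    · simp only [pvLoopA, hv, if_false, ih, List.any_cons, List.takeWhile_cons,
        Bool.false_or, Bool.not_eq_true', Bool.not_false, if_true, List.reverse_cons]
      split_ifs <;> simp_all

theorem pv_takeWhile_lt {xs : List String} (h : xs.any pvIsVowel = true) :
    (xs.takeWhile (fun p => !pvIsVowel p)).length < xs.length := by
  rcases lt_or_eq_of_le (List.takeWhile_prefix (l := xs) (fun p => !pvIsVowel p)).length_le with h' | h'
  · exact h'
  · exfalso
    have heq := (List.takeWhile_prefix (l := xs) (fun p => !pvIsVowel p)).eq_of_length h'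
    have hall := List.takeWhile_eq_self_iff.mp heq
    rcases List.any_eq_true.mp h with ⟨x, hx, hvx⟩
    have := hall x hx; simp [hvx] at this

-- B's fold yields the index of the last vowel (counted from the trailing non-vowel run)
theorem pvFoldB_char (xs : List String) (s : Int) (a : Option Int) :
    (PySem.List.enumerate xs s).foldl
        (fun acc ip => if pvIsVowel ip.2 then some ip.1 else acc) a =
      if xs.any pvIsVowel then
        some (s + ((xs.length - 1 - (xs.reverse.takeWhile (fun p => !pvIsVowel p)).length : Nat) : Int))
      else a := by
  induction xs using List.reverseRecOn generalizing s a with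
  | nil => simp [PySem.List.enumerate]
  | append_singleton ys y ih =>
    rw [PySem.List.enumerate_append, List.foldl_append]
    simp only [PySem.List.enumerate_cons, PySem.List.enumerate_nil, List.foldl_cons, List.foldl_nil]
    by_cases hv : pvIsVowel y
    · simp [hv, List.any_append]
    · rw [ih]
      by_cases hany : ys.any pvIsVowel
      · have hlt := pv_takeWhile_lt (xs := ys.reverse) (by simpa using hany)
        simp only [hany, hv, List.any_append, List.any_cons, List.any_nil,
          Bool.or_false, if_pos, List.reverse_append, List.reverse_cons,
          List.reverse_nil, List.nil_append, List.length_cons, List.length_append,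
          List.length_reverse, if_false]
        simp only [List.singleton_append]
        rw [List.takeWhile_cons_of_pos (by simp [hv])]
        simp only [List.length_reverse] at hlt
        simp only [List.length_cons, List.length_nil, if_neg (by simp : ¬(false = true))]
        congr 2
        omega
      · simp [hany, hv, List.any_append]

-- dropping everything up to the last vowel = reversing the non-vowel prefix of the reverse
theorem pv_drop_eq (l : List String) :
    l.reverse.drop (l.length - (l.takeWhile (fun p => !pvIsVowel p)).length) =
      (l.takeWhile (fun p => !pvIsVowel p)).reverse := by
  conv_rhs => rw [List.prefix_iff_eq_take.mp (List.takeWhile_prefix _)]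
  rw [List.reverse_take]

-- ===== VERDICT (by name: the statement is the Claim_ definition above) =====
theorem get_final_consonants_py_spec : Claim_equal_get_final_consonants_py := by
  intro xs _
  unfold Spec_get_final_consonants_py get_final_consonants_py get_final_consonants_py_alt
  rw [pvLoopA_char, pvFoldB_char]
  by_cases hany : xs.reverse.any pvIsVowel
  · have hany' : xs.any pvIsVowel = true := by simpa using hany
    have hlt := pv_takeWhile_lt hany
    simp only [List.length_reverse] at hlt
    simp only [hany, hany', if_pos, List.append_nil]
    have h1 : ((0 : Int) + ((xs.length - 1 - (xs.reverse.takeWhile (fun p => !pvIsVowel p)).length : Nat) : Int)) + 1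
        = ((xs.length - (xs.reverse.takeWhile (fun p => !pvIsVowel p)).length : Nat) : Int) := by
      omega
    rw [h1, PySem.List.slice_from_natCast]
    have := pv_drop_eq xs.reverse
    simp only [List.reverse_reverse, List.length_reverse] at this
    rw [this]
  · have hany' : xs.any pvIsVowel = false := by simpa using hany
    simp [hany, hany']
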